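-- pv_equiv track=rewrite | github.com/Jake-A-L/IFL-Barra | IndustryResolver.py | delete_different_data_new
-- ===== SOURCE A (Python) =====
-- def delete_different_data_new(original_factor_data):
--     target_company = []
--     factor_data = []
--     for i in range(len(original_factor_data)):
--         factor_data.append([])
--     temp_data = original_factor_data[0]
--     for company in temp_data:
--         guard = 1
--         for j in range(len(original_factor_data) - 1):
--             if company not in original_factor_data[j+1]:
--                 guard = 0
--                 break
--         if 1 == guard:
--             target_company.append(company)
--             for k in range(len(original_factor_data)):
--                 factor_data[k].append(original_factor_data[k][company])
--     return target_company, factor_data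
-- ===== SOURCE B (Python) =====
-- def delete_different_data_new(original_factor_data):
--     common = set(original_factor_data[0])
--     for data in original_factor_data[1:]:
--         common &= set(data)
--     target_company = [c for c in original_factor_data[0] if c in common]
--     factor_data = [[data[c] for c in target_company] for data in original_factor_data]
--     return target_company, factor_data
-- ===== Notes on version B (the rewrite author's own statement) =====
-- stated objective: simpler
-- what changed: A tests each company of the first dataset against every other dataset inside a nested guard loop and grows per-dataset columns one value at a time; B first reduces all datasets to a single set of common companies by folding a set intersection, then filters the first dataset's keys once and gathers each dataset's values in one comprehension per dataset.
import Mathlib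
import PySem

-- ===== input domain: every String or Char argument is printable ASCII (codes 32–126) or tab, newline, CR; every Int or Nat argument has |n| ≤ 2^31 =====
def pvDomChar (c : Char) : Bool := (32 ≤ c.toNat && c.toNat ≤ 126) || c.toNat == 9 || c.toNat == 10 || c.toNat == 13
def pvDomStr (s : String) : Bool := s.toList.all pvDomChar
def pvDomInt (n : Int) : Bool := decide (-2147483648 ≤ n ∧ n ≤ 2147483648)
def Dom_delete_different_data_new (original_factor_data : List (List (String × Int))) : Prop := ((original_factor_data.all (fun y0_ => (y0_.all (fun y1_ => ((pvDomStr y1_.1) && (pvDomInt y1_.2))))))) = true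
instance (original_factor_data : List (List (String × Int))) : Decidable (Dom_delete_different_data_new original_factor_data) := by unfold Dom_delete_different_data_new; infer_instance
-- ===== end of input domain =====

-- B replaces A's per-company rescan of all the other datasets by one up-front set
-- intersection followed by a per-dataset gather (objective: simpler).

-- dicts are association lists; pvLookup d c is d[c] (value at the first matching key).
-- Total form: the default 0 is unreachable where the ports use it — the key is always present.
def pvLookup (d : List (String × Int)) (c : String) : Int :=
  match d.find? (fun p => p.1 == c) with
  | some p => p.2
  | none => 0

-- ===== PORT A =====
def delete_different_data_new (original_factor_data : List (List (String × Int))) : List String × List (List Int) :=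
  -- for i in range(len(...)): factor_data.append([])
  let factor_data0 : List (List Int) :=
    (List.range original_factor_data.length).foldl (fun fd _ => fd ++ [[]]) []
  -- temp_data = original_factor_data[0]  (IndexError on [] — excluded by Pre_)
  let temp_data := PySem.List.pyGetD original_factor_data (0 : Int) []
  -- for company in temp_data: …   (iterating a dict yields its keys)
  (temp_data.map Prod.fst).foldl
    (fun st company =>
      -- guard = 1; for j in range(len(...)-1): if company not in ...[j+1]: guard = 0; break
      let guard : Int :=
        if (List.range (original_factor_data.length - 1)).all
            (fun j => (original_factor_data.getD (j + 1) []).any (fun p => p.1 == company))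
        then 1 else 0
      if guard = 1 then
        -- target_company.append(company);
        -- for k in range(len(...)): factor_data[k].append(original_factor_data[k][company])
        -- (factor_data and original_factor_data have the same length, so the k-loop
        --  walks the two lists in lockstep: rendered as zipWith)
        (st.1 ++ [company],
         List.zipWith (fun l d => l ++ [pvLookup d company]) st.2 original_factor_data)
      else st)
    ([], factor_data0)

-- ===== PORT B =====
def delete_different_data_new_alt (original_factor_data : List (List (String × Int))) : List String × List (List Int) :=
  -- common = set(original_factor_data[0]); for data in original_factor_data[1:]: common &= set(data)
  let d0 := PySem.List.pyGetD original_factor_data (0 : Int) []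
  let common : PySem.Set String :=
    (PySem.List.slice original_factor_data (some 1) none).foldl
      (fun s d => PySem.Set.inter s (PySem.Set.ofList (d.map Prod.fst)))
      (PySem.Set.ofList (d0.map Prod.fst))
  -- target_company = [c for c in original_factor_data[0] if c in common]
  let target_company := (d0.map Prod.fst).filter (fun c => PySem.Set.contains common c)
  -- factor_data = [[data[c] for c in target_company] for data in original_factor_data]
  (target_company,
   original_factor_data.map (fun d => target_company.map (fun c => pvLookup d c)))

-- ===== PRECONDITION & SPEC =====
-- A evaluates original_factor_data[0]: the empty list raises IndexError and is excluded.
def Pre_delete_different_data_new (original_factor_data : List (List (String × Int))) : Prop :=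
  original_factor_data ≠ []
instance (original_factor_data : List (List (String × Int))) : Decidable (Pre_delete_different_data_new original_factor_data) := by unfold Pre_delete_different_data_new; infer_instance

def pvWitness_delete_different_data_new : (List (List (String × Int))) :=
  [[("a", 1), ("b", 2)], [("b", 3), ("a", 4), ("c", 5)]]

def Spec_delete_different_data_new (original_factor_data : List (List (String × Int))) (out : List String × List (List Int)) : Prop := out = delete_different_data_new_alt original_factor_data
instance (original_factor_data : List (List (String × Int))) (out : List String × List (List Int)) : Decidable (Spec_delete_different_data_new original_factor_data out) := by unfold Spec_delete_different_data_new; infer_instance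

-- ===== CLAIM (what is proved, stated in full; the proofs are below) =====
def Claim_equal_delete_different_data_new : Prop := ∀ (original_factor_data : List (List (String × Int))), Dom_delete_different_data_new original_factor_data → Pre_delete_different_data_new original_factor_data → Spec_delete_different_data_new original_factor_data (delete_different_data_new original_factor_data)

-- ===== LEMMAS AND PROOFS =====

-- membership in B's folded intersection
lemma mem_foldl_inter (l : List (List (String × Int))) (s : PySem.Set String) (c : String) :
    c ∈ l.foldl (fun s d => PySem.Set.inter s (PySem.Set.ofList (d.map Prod.fst))) s ↔
      c ∈ s ∧ ∀ d ∈ l, c ∈ d.map Prod.fst := by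
  induction l generalizing s with
  | nil => simp
  | cons d l ih =>
      simp [ih, PySem.Set.mem_inter, PySem.Set.mem_ofList, and_assoc]

-- indexing a list over range(len) visits exactly its elements
lemma range_all_getD {α : Type} (dflt : α) (l : List α) (p : α → Bool) :
    (List.range l.length).all (fun j => p (l.getD j dflt)) = l.all p := by
  induction l with
  | nil => rfl
  | cons a l ih =>
      simp only [List.length_cons, List.range_succ_eq_map, List.all_cons, List.all_map,
        Function.comp_def, List.getD_cons_succ, List.getD_cons_zero]
      rw [ih]

-- appending a fresh [] per dataset builds replicate
lemma foldl_append_empty (n : Nat) :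
    (List.range n).foldl (fun (fd : List (List Int)) _ => fd ++ [[]]) [] = List.replicate n [] := by
  induction n with
  | zero => rfl
  | succ n ih =>
      rw [List.range_succ, List.foldl_append, ih, List.replicate_succ']
      rfl

lemma zipWith_lookup_map (ofd : List (List (String × Int))) (g : List (String × Int) → List Int)
    (c : String) :
    List.zipWith (fun l d => l ++ [pvLookup d c]) (ofd.map g) ofd
      = ofd.map (fun d => g d ++ [pvLookup d c]) := by
  induction ofd with
  | nil => rfl
  | cons d l ih => simp [ih]

-- A's main loop, characterised
lemma foldA_eq (ofd : List (List (String × Int))) (P : String → Bool)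
    (ks : List String) (tc : List String) (g : List (String × Int) → List Int) :
    ks.foldl
      (fun st company =>
        if P company = true then
          (st.1 ++ [company],
           List.zipWith (fun l d => l ++ [pvLookup d company]) st.2 ofd)
        else st)
      (tc, ofd.map g) =
    (tc ++ ks.filter P,
     ofd.map (fun d => g d ++ (ks.filter P).map (fun c => pvLookup d c))) := by
  induction ks generalizing tc g with
  | nil => simp
  | cons c ks ih =>
      rw [List.foldl_cons]
      by_cases h : P c = true
      · rw [if_pos h, zipWith_lookup_map, ih, List.filter_cons_of_pos h]
        simp [List.append_assoc]
      · rw [if_neg h, ih, List.filter_cons_of_neg h]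

-- the guard's 0/1 encoding, as a propositional rewrite
lemma guard_encode (b : Bool) : ((if b = true then (1 : Int) else 0) = 1) = (b = true) := by
  cases b <;> simp

theorem delete_different_data_new_spec_aux (d0 : List (String × Int))
    (rest : List (List (String × Int))) :
    delete_different_data_new (d0 :: rest) = delete_different_data_new_alt (d0 :: rest) := by
  unfold delete_different_data_new delete_different_data_new_alt
  have h0 : PySem.List.pyGetD (d0 :: rest) (0 : Int) [] = d0 := by
    simp [pysem]
  have hsl : PySem.List.slice (d0 :: rest) (some 1) none = rest := by
    rw [PySem.List.slice_from_one]
    rfl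
  simp only [h0, hsl, guard_encode, foldl_append_empty]
  -- normalise the guard predicate to a predicate on rest
  have hg : ∀ c : String,
      ((List.range ((d0 :: rest).length - 1)).all
        (fun j => ((d0 :: rest).getD (j + 1) []).any (fun p => p.1 == c)))
      = rest.all (fun d => d.any (fun p => p.1 == c)) := by
    intro c
    simp only [List.length_cons, Nat.add_sub_cancel, List.getD_cons_succ]
    exact range_all_getD [] rest (fun d => d.any (fun p => p.1 == c))
  have hrepl : List.replicate (d0 :: rest).length ([] : List Int)
      = (d0 :: rest).map (fun _ => ([] : List Int)) := by
    rw [List.map_const']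
  rw [hrepl]
  simp only [hg]
  rw [foldA_eq (d0 :: rest) (fun c => rest.all (fun d => d.any (fun p => p.1 == c)))
        (d0.map Prod.fst) [] (fun _ => [])]
  -- the two filter predicates agree on the keys of d0
  have hfilt :
      (d0.map Prod.fst).filter (fun c => rest.all (fun d => d.any (fun p => p.1 == c)))
      = (d0.map Prod.fst).filter (fun c =>
          PySem.Set.contains
            (rest.foldl (fun s d => PySem.Set.inter s (PySem.Set.ofList (d.map Prod.fst)))
              (PySem.Set.ofList (d0.map Prod.fst))) c) := by
    apply List.filter_congr
    intro c hc
    rw [Bool.eq_iff_iff]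
    rw [PySem.Set.contains_iff, mem_foldl_inter]
    simp only [List.all_eq_true, List.any_eq_true, beq_iff_eq, PySem.Set.mem_ofList,
      List.mem_map]
    constructor
    · intro h
      refine ⟨?_, fun d hd => ?_⟩
      · exact (List.mem_map.mp hc).imp (fun p hp => ⟨hp.1, hp.2⟩)
      · obtain ⟨p, hp, hpc⟩ := h d hd
        exact ⟨p, hp, hpc⟩
    · intro ⟨_, h⟩ d hd
      obtain ⟨p, hp, hpc⟩ := h d hd
      exact ⟨p, hp, hpc⟩
  rw [hfilt]
  simp

-- ===== VERDICT (by name: the statement is the Claim_ definition above) =====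
theorem delete_different_data_new_spec : Claim_equal_delete_different_data_new := by
  intro ofd _ hpre
  unfold Spec_delete_different_data_new
  cases ofd with
  | nil => exact absurd rfl hpre
  | cons d0 rest => exact delete_different_data_new_spec_aux d0 rest
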